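-- pv_equiv track=rewrite | github.com/wlsgusjjn/EAX-TSP | EAX_TSP.py | sameEdge
-- ===== SOURCE A (Python) =====
-- def sameEdge(used,arr):
--     n = len(arr)
--     if len(used) == 0:
--         return False
--
--     for i in range(n-1):
--         for j in range(len(used)):
--             for k in range(len(used[j])-1):
--                 if arr[i] == used[j][k] and arr[i+1] == used[j][k+1]:
--                     return True
--                 if arr[i+1] == used[j][k] and arr[i] == used[j][k+1]:
--                     return True
--     return False
-- ===== SOURCE B (Python) =====
-- def sameEdge(used, arr):
--     edges = set()
--     for path in used:
--         for a, b in zip(path, path[1:]):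
--             edges.add((a, b))
--             edges.add((b, a))
--     return any(e in edges for e in zip(arr, arr[1:]))
-- ===== Notes on version B (the rewrite author's own statement) =====
-- stated objective: simpler
-- what changed: Replaces the triple nested index loop (rescanning every used path for every arr pair) by building a set of both orientations of all used edges once and then making a single membership pass over arr's consecutive pairs.
import Mathlib
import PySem

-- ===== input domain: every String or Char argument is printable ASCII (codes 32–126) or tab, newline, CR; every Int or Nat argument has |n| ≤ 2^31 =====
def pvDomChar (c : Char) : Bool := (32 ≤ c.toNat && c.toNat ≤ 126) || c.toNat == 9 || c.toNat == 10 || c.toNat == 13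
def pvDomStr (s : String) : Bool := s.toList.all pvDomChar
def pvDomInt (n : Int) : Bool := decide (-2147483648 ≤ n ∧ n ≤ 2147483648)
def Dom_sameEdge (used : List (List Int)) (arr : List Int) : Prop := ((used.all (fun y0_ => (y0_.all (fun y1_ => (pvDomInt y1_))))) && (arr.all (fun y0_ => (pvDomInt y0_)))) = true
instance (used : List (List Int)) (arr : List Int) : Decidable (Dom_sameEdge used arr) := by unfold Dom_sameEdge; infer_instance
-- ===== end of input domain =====

-- B builds a set of all used edges (both orientations) once and then makes a single
-- membership pass over arr's consecutive pairs, replacing A's triple nested loop (simpler).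

-- ===== PORT A =====
def sameEdge (used : List (List Int)) (arr : List Int) : Bool :=
  let n := arr.length
  if used.length = 0 then false
  else
    (List.range (n - 1)).any fun i =>
      (List.range used.length).any fun j =>
        (List.range ((used.getD j []).length - 1)).any fun k =>
          ((arr.getD i 0 == (used.getD j []).getD k 0 &&
            arr.getD (i+1) 0 == (used.getD j []).getD (k+1) 0) ||
           (arr.getD (i+1) 0 == (used.getD j []).getD k 0 &&
            arr.getD i 0 == (used.getD j []).getD (k+1) 0))

-- ===== PORT B =====
def buildEdges (used : List (List Int)) : PySem.Set (Int × Int) :=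
  used.foldl
    (fun s path =>
      (path.zip path.tail).foldl
        (fun s q => PySem.Set.add (PySem.Set.add s q) (q.2, q.1)) s)
    PySem.Set.empty

def sameEdge_alt (used : List (List Int)) (arr : List Int) : Bool :=
  (arr.zip arr.tail).any fun e => PySem.Set.contains (buildEdges used) e

-- ===== PRECONDITION & SPEC =====
def Spec_sameEdge (used : List (List Int)) (arr : List Int) (out : Bool) : Prop := out = sameEdge_alt used arr
instance (used : List (List Int)) (arr : List Int) (out : Bool) : Decidable (Spec_sameEdge used arr out) := by unfold Spec_sameEdge; infer_instance

-- ===== CLAIM (what is proved, stated in full; the proofs are below) =====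
def Claim_equal_sameEdge : Prop := ∀ (used : List (List Int)) (arr : List Int), Dom_sameEdge used arr → Spec_sameEdge used arr (sameEdge used arr)

-- ===== LEMMAS AND PROOFS =====

-- membership in a zip of a list with its tail = a consecutive pair
theorem mem_zip_tail (xs : List Int) (e : Int × Int) :
    e ∈ xs.zip xs.tail ↔ ∃ i, ∃ h : i + 1 < xs.length, e = (xs[i], xs[i+1]) := by
  rw [List.mem_iff_getElem]
  constructor
  · rintro ⟨i, hi, he⟩
    have hlen : i + 1 < xs.length := by
      simp [List.length_zip, List.length_tail] at hi; omega
    refine ⟨i, hlen, ?_⟩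
    rw [← he, List.getElem_zip, List.getElem_tail]
  · rintro ⟨i, hi, he⟩
    have hi' : i < (xs.zip xs.tail).length := by
      simp [List.length_zip, List.length_tail]; omega
    exact ⟨i, hi', by rw [List.getElem_zip, List.getElem_tail, he]⟩

theorem mem_inner_fold (l : List (Int × Int)) (s : PySem.Set (Int × Int)) (e : Int × Int) :
    e ∈ l.foldl (fun s q => PySem.Set.add (PySem.Set.add s q) (q.2, q.1)) s ↔
      e ∈ s ∨ ∃ q ∈ l, e = q ∨ e = (q.2, q.1) := by
  induction l generalizing s with
  | nil => simp
  | cons q l ih =>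
    simp only [List.foldl_cons, ih, PySem.Set.mem_add, List.mem_cons]
    constructor
    · rintro (((h | h) | h) | ⟨q', hq', h⟩)
      · exact Or.inl h
      · exact Or.inr ⟨q, Or.inl rfl, Or.inl h⟩
      · exact Or.inr ⟨q, Or.inl rfl, Or.inr h⟩
      · exact Or.inr ⟨q', Or.inr hq', h⟩
    · rintro (h | ⟨q', (rfl | hq'), h⟩)
      · exact Or.inl (Or.inl (Or.inl h))
      · rcases h with h | h
        · exact Or.inl (Or.inl (Or.inr h))
        · exact Or.inl (Or.inr h)
      · exact Or.inr ⟨q', hq', h⟩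

theorem mem_buildEdges (used : List (List Int)) (e : Int × Int) :
    e ∈ buildEdges used ↔ ∃ p ∈ used, ∃ q ∈ p.zip p.tail, e = q ∨ e = (q.2, q.1) := by
  unfold buildEdges
  suffices h : ∀ (s : PySem.Set (Int × Int)),
      e ∈ used.foldl (fun s path => (path.zip path.tail).foldl
        (fun s q => PySem.Set.add (PySem.Set.add s q) (q.2, q.1)) s) s ↔
      e ∈ s ∨ ∃ p ∈ used, ∃ q ∈ p.zip p.tail, e = q ∨ e = (q.2, q.1) by
    simpa [PySem.Set.empty] using h PySem.Set.empty
  induction used with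
  | nil => simp
  | cons p used ih =>
    intro s
    simp only [List.foldl_cons, ih, mem_inner_fold, List.mem_cons]
    constructor
    · rintro ((h | h) | ⟨p', hp', h⟩)
      · exact Or.inl h
      · exact Or.inr ⟨p, Or.inl rfl, h⟩
      · exact Or.inr ⟨p', Or.inr hp', h⟩
    · rintro (h | ⟨p', (rfl | hp'), h⟩)
      · exact Or.inl (Or.inl h)
      · exact Or.inl (Or.inr h)
      · exact Or.inr ⟨p', hp', h⟩

-- the common characterisation both ports reduce to
def EdgeHit (used : List (List Int)) (arr : List Int) : Prop :=
  ∃ i, ∃ _ : i + 1 < arr.length, ∃ p ∈ used, ∃ k, ∃ _ : k + 1 < p.length,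
    (arr[i] = p[k] ∧ arr[i+1] = p[k+1]) ∨ (arr[i+1] = p[k] ∧ arr[i] = p[k+1])

theorem sameEdge_iff (used : List (List Int)) (arr : List Int) :
    sameEdge used arr = true ↔ EdgeHit used arr := by
  unfold sameEdge EdgeHit
  by_cases hu : used.length = 0
  · have : used = [] := List.length_eq_zero_iff.mp hu
    subst this
    simp
  · simp only [if_neg hu, List.any_eq_true, List.mem_range]
    constructor
    · rintro ⟨i, hi, j, hj, k, hk, hcond⟩
      refine ⟨i, by omega, used[j], List.getElem_mem hj, k, ?_, ?_⟩
      · have : used.getD j [] = used[j] := List.getD_eq_getElem used [] hj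
        rw [this] at hk; omega
      · have hgd : used.getD j [] = used[j] := List.getD_eq_getElem used [] hj
        rw [hgd] at hk hcond
        have hk1 : k + 1 < used[j].length := by omega
        have hi1 : i + 1 < arr.length := by omega
        simp only [List.getD_eq_getElem arr 0 (by omega : i < arr.length),
          List.getD_eq_getElem arr 0 hi1,
          List.getD_eq_getElem used[j] 0 (by omega : k < used[j].length),
          List.getD_eq_getElem used[j] 0 hk1,
          Bool.or_eq_true, Bool.and_eq_true, beq_iff_eq] at hcond
        exact hcond
    · rintro ⟨i, hi, p, hp, k, hk, hcond⟩
      obtain ⟨j, hj, rfl⟩ := List.mem_iff_getElem.mp hp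
      refine ⟨i, by omega, j, hj, k, ?_, ?_⟩
      · rw [List.getD_eq_getElem used [] hj]; omega
      · rw [List.getD_eq_getElem used [] hj]
        simp only [List.getD_eq_getElem arr 0 (by omega : i < arr.length),
          List.getD_eq_getElem arr 0 hi,
          List.getD_eq_getElem used[j] 0 (by omega : k < used[j].length),
          List.getD_eq_getElem used[j] 0 hk,
          Bool.or_eq_true, Bool.and_eq_true, beq_iff_eq]
        exact hcond

theorem sameEdge_alt_iff (used : List (List Int)) (arr : List Int) :
    sameEdge_alt used arr = true ↔ EdgeHit used arr := by
  unfold sameEdge_alt EdgeHit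
  simp only [List.any_eq_true, PySem.Set.contains_iff, mem_buildEdges, mem_zip_tail]
  constructor
  · rintro ⟨e, ⟨i, hi, rfl⟩, p, hp, q, ⟨k, hk, rfl⟩, hor⟩
    refine ⟨i, hi, p, hp, k, hk, ?_⟩
    rcases hor with h | h
    · exact Or.inl ⟨by simpa using congrArg Prod.fst h, by simpa using congrArg Prod.snd h⟩
    · exact Or.inr ⟨by simpa using congrArg Prod.snd h, by simpa using congrArg Prod.fst h⟩
  · rintro ⟨i, hi, p, hp, k, hk, hor⟩
    refine ⟨(arr[i], arr[i+1]), ⟨i, hi, rfl⟩, p, hp, (p[k], p[k+1]), ⟨k, hk, rfl⟩, ?_⟩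
    rcases hor with ⟨h1, h2⟩ | ⟨h1, h2⟩
    · exact Or.inl (by simp [h1, h2])
    · exact Or.inr (by simp [h1, h2])

-- ===== VERDICT (by name: the statement is the Claim_ definition above) =====
theorem sameEdge_spec : Claim_equal_sameEdge := by
  intro used arr _
  unfold Spec_sameEdge
  have h := (sameEdge_iff used arr).trans (sameEdge_alt_iff used arr).symm
  cases hA : sameEdge used arr <;> cases hB : sameEdge_alt used arr <;>
    simp_all
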